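-- pv_equiv track=rewrite | github.com/iamyenachoi/Algorithm | 프로그래머스/0/120890. 가까운 수/가까운 수.py | solution
-- ===== SOURCE A (Python) =====
-- def solution(array, n):
--     answer = 0
--     temp = float('inf')
--     array.sort()
--     for i in array:
--         diff = abs(n - i)
--         if diff < temp:
--             temp = diff
--             answer = i
--     return answer
-- ===== SOURCE B (Python) =====
-- # B: sort, then binary-search n's insertion point and compare only the two
-- # neighbouring elements (tie goes to the smaller value), instead of scanning
-- # the whole sorted array with a running-minimum sentinel.
-- # Like A, this sorts `array` in place (same side effect).
-- def solution(array, n):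
--     array.sort()
--     lo, hi = 0, len(array)
--     while lo < hi:
--         mid = (lo + hi) // 2
--         if array[mid] < n:
--             lo = mid + 1
--         else:
--             hi = mid
--     i = lo
--     if i == 0:
--         return array[0]
--     if i == len(array):
--         return array[-1]
--     left, right = array[i - 1], array[i]
--     return left if n - left <= right - n else right
-- ===== Notes on version B (the rewrite author's own statement) =====
-- stated objective: alternative
-- what changed: Instead of scanning the whole sorted array with a running-minimum sentinel, B binary-searches n's insertion point in the sorted array and compares only the two neighbouring elements (<= gives the smaller value on ties).
-- outside the precondition, e.g. on solution([], 0): A returns 0, B raises IndexError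
import Mathlib
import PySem

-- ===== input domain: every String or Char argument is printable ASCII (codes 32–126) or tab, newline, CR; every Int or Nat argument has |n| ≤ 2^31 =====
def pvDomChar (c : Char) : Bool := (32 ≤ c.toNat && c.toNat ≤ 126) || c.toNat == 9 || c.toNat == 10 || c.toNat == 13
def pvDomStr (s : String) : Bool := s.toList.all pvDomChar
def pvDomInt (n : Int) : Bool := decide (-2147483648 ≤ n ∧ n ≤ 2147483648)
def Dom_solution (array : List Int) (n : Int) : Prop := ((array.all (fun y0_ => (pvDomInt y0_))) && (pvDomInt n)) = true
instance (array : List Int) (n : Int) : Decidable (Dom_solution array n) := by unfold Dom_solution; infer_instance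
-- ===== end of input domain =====

-- B sorts then binary-searches n's insertion point and inspects only the two neighbours
-- (same sorted-array answer as A's full running-minimum scan); like A it sorts the list
-- argument in place in Python — the equivalence proved here is about the return value.


-- ===== PORT A =====
-- one loop step of A: `diff = abs(n - i); if diff < temp: temp, answer = diff, i`
-- (`none` models the initial `temp = float('inf')`, which every diff is below)
def stepA (n : Int) (st : Int × Option Int) (i : Int) : Int × Option Int :=
  let diff := |n - i|
  match st.2 with
  | none => (i, some diff)
  | some t => if diff < t then (i, some diff) else st

def solution (array : List Int) (n : Int) : Int :=
  let s := PySem.List.sorted array (fun x => x)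
  (s.foldl (stepA n) ((0 : Int), none)).1

-- ===== PORT B =====
-- the hand-written bisect_left loop of Source B: `while lo < hi: mid = (lo+hi)//2; ...`
-- (lo, hi, mid are nonnegative Python ints, so Nat with Nat division is exact)
-- fuel = hi - lo bounds the iteration count (hi - lo strictly shrinks each turn),
-- so `fuel = len(s)` runs the while-loop to completion
def bisectLoop (s : List Int) (x : Int) : Nat → Nat → Nat → Nat
  | 0, lo, _ => lo
  | fuel + 1, lo, hi =>
    if lo < hi then
      let mid := (lo + hi) / 2
      if PySem.List.pyGetD s (mid : Int) 0 < x then bisectLoop s x fuel (mid + 1) hi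
      else bisectLoop s x fuel lo mid
    else lo

def solution_alt (array : List Int) (n : Int) : Int :=
  let s := PySem.List.sorted array (fun x => x)
  let i := bisectLoop s n s.length 0 s.length
  if i = 0 then PySem.List.pyGetD s 0 0
  else if i = s.length then PySem.List.pyGetD s (-1) 0
  else
    let left := PySem.List.pyGetD s ((i : Int) - 1) 0
    let right := PySem.List.pyGetD s (i : Int) 0
    if n - left ≤ right - n then left else right

-- ===== PRECONDITION & SPEC =====
-- Pre_ excludes the empty list: A returns its `answer = 0` sentinel there (an accident of
-- its implementation), while B's natural indexing array[0] raises IndexError.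
def Pre_solution (array : List Int) (n : Int) : Prop := array ≠ []
instance (array : List Int) (n : Int) : Decidable (Pre_solution array n) := by
  unfold Pre_solution; infer_instance
def pvWitness_solution : List Int × Int := ([1, 4, 9], 5)

def Spec_solution (array : List Int) (n : Int) (out : Int) : Prop := out = solution_alt array n
instance (array : List Int) (n : Int) (out : Int) : Decidable (Spec_solution array n out) := by unfold Spec_solution; infer_instance

-- ===== CLAIM (what is proved, stated in full; the proofs are below) =====
def Claim_equal_solution : Prop := ∀ (array : List Int) (n : Int), Dom_solution array n → Pre_solution array n → Spec_solution array n (solution array n)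

-- ===== LEMMAS AND PROOFS =====

-- "a is at least as close to n as b, with the smaller value winning ties"
def kLe (n a b : Int) : Prop := |n - a| < |n - b| ∨ (|n - a| = |n - b| ∧ a ≤ b)

theorem kLe_refl (n a : Int) : kLe n a a := Or.inr ⟨rfl, le_refl a⟩

theorem kLe_antisymm {n a b : Int} (h1 : kLe n a b) (h2 : kLe n b a) : a = b := by
  unfold kLe at h1 h2; omega

theorem foldA_spec (n : Int) : ∀ (l : List Int) (a : Int), (∀ y ∈ l, a ≤ y) →
    l.Pairwise (· ≤ ·) →
    ((l.foldl (stepA n) (a, some |n - a|)).1 = a ∨ (l.foldl (stepA n) (a, some |n - a|)).1 ∈ l)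
    ∧ kLe n (l.foldl (stepA n) (a, some |n - a|)).1 a
    ∧ ∀ y ∈ l, kLe n (l.foldl (stepA n) (a, some |n - a|)).1 y := by
  intro l
  induction l with
  | nil => intro a _ _; exact ⟨Or.inl rfl, kLe_refl n a, by simp⟩
  | cons x t ih =>
    intro a ha hp
    have hax : a ≤ x := ha x (by simp)
    have hxt : ∀ y ∈ t, x ≤ y := fun y hy => (List.pairwise_cons.mp hp).1 y hy
    have hpt : t.Pairwise (· ≤ ·) := (List.pairwise_cons.mp hp).2
    have hat : ∀ y ∈ t, a ≤ y := fun y hy => ha y (by simp [hy])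
    simp only [List.foldl_cons]
    by_cases hd : |n - x| < |n - a|
    · have hstep : stepA n (a, some |n - a|) x = (x, some |n - x|) := by
        simp [stepA, hd]
      rw [hstep]
      obtain ⟨hm, hkx, hall⟩ := ih x hxt hpt
      refine ⟨?_, ?_, ?_⟩
      · rcases hm with h | h
        · exact Or.inr (by simp [h])
        · exact Or.inr (by simp [h])
      · rcases hkx with h | ⟨h1, _⟩
        · exact Or.inl (lt_trans h hd)
        · exact Or.inl (by omega)
      · intro y hy
        rcases List.mem_cons.mp hy with rfl | hyt
        · exact hkx
        · exact hall y hyt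
    · have hstep : stepA n (a, some |n - a|) x = (a, some |n - a|) := by
        simp [stepA, hd]
      rw [hstep]
      obtain ⟨hm, hka, hall⟩ := ih a hat hpt
      refine ⟨?_, hka, ?_⟩
      · rcases hm with h | h
        · exact Or.inl h
        · exact Or.inr (by simp [h])
      · intro y hy
        rcases List.mem_cons.mp hy with rfl | hyt
        · rcases hka with h | ⟨h1, h2⟩
          · exact Or.inl (by omega)
          · rcases lt_or_eq_of_le (not_lt.mp hd) with h | h
            · exact Or.inl (by omega)
            · exact Or.inr ⟨by omega, by omega⟩
        · exact hall y hyt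

-- invariant of the bisect_left loop
theorem bisectLoop_spec (s : List Int) (x : Int) (hp : s.Pairwise (· ≤ ·)) :
    ∀ (k lo hi : Nat), hi - lo ≤ k → lo ≤ hi → hi ≤ s.length →
    (∀ j (hj : j < s.length), j < lo → s[j] < x) →
    (∀ j (hj : j < s.length), hi ≤ j → x ≤ s[j]) →
    lo ≤ bisectLoop s x k lo hi ∧ bisectLoop s x k lo hi ≤ hi ∧
    (∀ j (hj : j < s.length), j < bisectLoop s x k lo hi → s[j] < x) ∧
    (∀ j (hj : j < s.length), bisectLoop s x k lo hi ≤ j → x ≤ s[j]) := by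
  have hmono : ∀ (j1 j2 : Nat) (h1 : j1 < s.length) (h2 : j2 < s.length), j1 ≤ j2 → s[j1] ≤ s[j2] := by
    intro j1 j2 h1 h2 hle
    rcases Nat.lt_or_ge j1 j2 with h | h
    · exact (List.pairwise_iff_getElem.mp hp) j1 j2 h1 h2 h
    · have : j1 = j2 := by omega
      subst this; exact le_refl _
  intro k
  induction k with
  | zero =>
    intro lo hi hk hlh hhl hpre hpost
    have : lo = hi := by omega
    subst this
    simp only [bisectLoop]
    exact ⟨le_refl _, le_refl _, hpre, hpost⟩
  | succ k ih =>
    intro lo hi hk hlh hhl hpre hpost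
    simp only [bisectLoop]
    by_cases hlt : lo < hi
    · simp only [hlt, if_true]
      have hmidlt : (lo + hi) / 2 < s.length := by omega
      have hget : PySem.List.pyGetD s (((lo + hi) / 2 : Nat) : Int) 0 = s[(lo + hi) / 2] := by
        rw [PySem.List.pyGetD_natCast, List.getD_eq_getElem _ _ hmidlt]
      rw [hget]
      by_cases hc : s[(lo + hi) / 2] < x
      · simp only [hc, if_true]
        have h := ih ((lo + hi) / 2 + 1) hi (by omega) (by omega) hhl
          (fun j hj hjlt => by
            rcases Nat.lt_or_ge j lo with h2 | h2
            · exact hpre j hj h2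
            · exact lt_of_le_of_lt (hmono j ((lo + hi) / 2) hj hmidlt (by omega)) hc)
          hpost
        exact ⟨by omega, h.2.1, h.2.2⟩
      · simp only [hc, if_false]
        have h := ih lo ((lo + hi) / 2) (by omega) (by omega) (by omega) hpre
          (fun j hj hjge => le_trans (not_lt.mp hc) (hmono ((lo + hi) / 2) j hmidlt hj hjge))
        exact ⟨h.1, by omega, h.2.2⟩
    · simp only [hlt, if_false]
      exact ⟨le_refl _, hlh, hpre, fun j hj hgj => hpost j hj (by omega)⟩

-- B's neighbour choice is the tie-broken closest element of the sorted list
theorem alt_spec (array : List Int) (n : Int) (hne : array ≠ []) :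
    solution_alt array n ∈ PySem.List.sorted array (fun x => x) ∧
    ∀ y ∈ PySem.List.sorted array (fun x => x), kLe n (solution_alt array n) y := by
  set s := PySem.List.sorted array (fun x => x) with hs
  have hp : s.Pairwise (· ≤ ·) := PySem.List.sorted_pairwise array (fun x => x)
  have hsne : s ≠ [] := by
    have hlen_eq : s.length = array.length :=
      (PySem.List.sorted_perm array (fun x => x) false).length_eq
    intro h
    rw [h] at hlen_eq
    exact hne (List.length_eq_zero_iff.mp hlen_eq.symm)
  have hlen : 0 < s.length := List.length_pos_iff.mpr hsne
  obtain ⟨hi0, hile, hpre, hpost⟩ := bisectLoop_spec s n hp s.length 0 s.length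
    (by omega) (by omega) (le_refl _) (by omega) (by omega)
  set i := bisectLoop s n s.length 0 s.length with hidef
  have hy_idx : ∀ y ∈ s, ∃ (j : Nat) (hj : j < s.length), s[j] = y := by
    intro y hy
    obtain ⟨j, hj, hjy⟩ := List.mem_iff_getElem.mp hy
    exact ⟨j, hj, hjy⟩
  have hmono : ∀ (j1 j2 : Nat) (h1 : j1 < s.length) (h2 : j2 < s.length), j1 ≤ j2 → s[j1] ≤ s[j2] := by
    intro j1 j2 h1 h2 hle
    rcases Nat.lt_or_ge j1 j2 with h | h
    · exact (List.pairwise_iff_getElem.mp hp) j1 j2 h1 h2 h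
    · have : j1 = j2 := by omega
      subst this; exact le_refl _
  by_cases h0 : i = 0
  · -- all elements ≥ n; answer is s[0]
    have hval : solution_alt array n = s[0] := by
      simp only [solution_alt, ← hs, ← hidef, h0, if_true]
      rw [PySem.List.pyGetD_zero, List.getD_eq_getElem _ _ hlen]
    refine ⟨by rw [hval]; exact List.getElem_mem _, ?_⟩
    intro y hy
    obtain ⟨j, hj, rfl⟩ := hy_idx y hy
    have h1 : n ≤ s[0] := hpost 0 hlen (by omega)
    have h2 : s[0] ≤ s[j] := hmono 0 j hlen hj (by omega)
    rw [hval]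
    have e1 : |n - s[0]| = s[0] - n := by rw [abs_of_nonpos (by omega)]; ring
    have e2 : |n - s[j]| = s[j] - n := by rw [abs_of_nonpos (by omega)]; ring
    unfold kLe; omega
  · by_cases hL : i = s.length
    · -- all elements < n; answer is the last element
      have hval : solution_alt array n = s[s.length - 1] := by
        simp only [solution_alt, ← hs, ← hidef, hL, if_true]
        rw [PySem.List.pyGetD_neg_one s 0 hsne, List.getLast_eq_getElem]
        rw [if_neg (by omega : ¬ s.length = 0)]
      refine ⟨by rw [hval]; exact List.getElem_mem _, ?_⟩
      intro y hy
      obtain ⟨j, hj, rfl⟩ := hy_idx y hy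
      have h1 : s[s.length - 1] < n := hpre (s.length - 1) (by omega) (by omega)
      have h2 : s[j] ≤ s[s.length - 1] := hmono j (s.length - 1) hj (by omega) (by omega)
      rw [hval]
      have e1 : |n - s[s.length - 1]| = n - s[s.length - 1] := abs_of_nonneg (by omega)
      have e2 : |n - s[j]| = n - s[j] := abs_of_nonneg (by omega)
      unfold kLe; omega
    · -- 0 < i < len: compare the two neighbours s[i-1] < n ≤ s[i]
      have hi_lt : i < s.length := by omega
      have him1 : i - 1 < s.length := by omega
      have hcast : ((i : Int) - 1) = ((i - 1 : Nat) : Int) := by omega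
      have hgl : PySem.List.pyGetD s ((i : Int) - 1) 0 = s[i - 1] := by
        rw [hcast, PySem.List.pyGetD_natCast, List.getD_eq_getElem _ _ him1]
      have hgr : PySem.List.pyGetD s ((i : Int)) 0 = s[i] := by
        rw [PySem.List.pyGetD_natCast, List.getD_eq_getElem _ _ hi_lt]
      have hval : solution_alt array n =
          if n - s[i - 1] ≤ s[i] - n then s[i - 1] else s[i] := by
        simp only [solution_alt, ← hs, ← hidef, h0, hL, if_false]
        rw [hgl, hgr]
      have hlo : s[i - 1] < n := hpre (i - 1) him1 (by omega)
      have hhi : n ≤ s[i] := hpost i hi_lt (le_refl _)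
      have key : ∀ y ∈ s, kLe n (if n - s[i - 1] ≤ s[i] - n then s[i - 1] else s[i]) y := by
        intro y hy
        obtain ⟨j, hj, rfl⟩ := hy_idx y hy
        have e1 : |n - s[i - 1]| = n - s[i - 1] := abs_of_nonneg (by omega)
        have e2 : |n - s[i]| = s[i] - n := by rw [abs_of_nonpos (by omega)]; ring
        rcases Nat.lt_or_ge j i with hji | hji
        · -- s[j] < n, and s[j] ≤ s[i-1]
          have hjn : s[j] < n := hpre j hj hji
          have hjle : s[j] ≤ s[i - 1] := hmono j (i - 1) hj him1 (by omega)
          have e3 : |n - s[j]| = n - s[j] := abs_of_nonneg (by omega)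
          by_cases hc : n - s[i - 1] ≤ s[i] - n
          · simp only [hc, if_true]; unfold kLe; omega
          · simp only [hc, if_false]; unfold kLe; omega
        · -- n ≤ s[i] ≤ s[j]
          have hjn : n ≤ s[j] := hpost j hj hji
          have hjge : s[i] ≤ s[j] := hmono i j hi_lt hj hji
          have e3 : |n - s[j]| = s[j] - n := by rw [abs_of_nonpos (by omega)]; ring
          by_cases hc : n - s[i - 1] ≤ s[i] - n
          · simp only [hc, if_true]; unfold kLe; omega
          · simp only [hc, if_false]; unfold kLe; omega
      refine ⟨?_, by rw [hval]; exact key⟩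
      rw [hval]
      by_cases hc : n - s[i - 1] ≤ s[i] - n
      · simp only [hc, if_true]; exact List.getElem_mem _
      · simp only [hc, if_false]; exact List.getElem_mem _

-- ===== VERDICT (by name: the statement is the Claim_ definition above) =====
theorem solution_spec : Claim_equal_solution := by
  intro array n _ hpre
  unfold Spec_solution
  set s := PySem.List.sorted array (fun x => x) with hs
  have hp : s.Pairwise (· ≤ ·) := PySem.List.sorted_pairwise array (fun x => x)
  have hsne : s ≠ [] := by
    have hlen_eq : s.length = array.length :=
      (PySem.List.sorted_perm array (fun x => x) false).length_eq
    intro h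
    rw [h] at hlen_eq
    exact hpre (List.length_eq_zero_iff.mp hlen_eq.symm)
  obtain ⟨x, t, hxt⟩ := List.exists_cons_of_ne_nil hsne
  have hA : solution array n = ((x :: t).foldl (stepA n) ((0 : Int), none)).1 := by
    simp only [solution, ← hs, hxt]
  have hstep0 : stepA n ((0 : Int), none) x = (x, some |n - x|) := by simp [stepA]
  rw [hxt] at hp
  obtain ⟨hm, _, hall⟩ := foldA_spec n t x
    (fun y hy => (List.pairwise_cons.mp hp).1 y hy) (List.pairwise_cons.mp hp).2
  obtain ⟨hm', hall'⟩ := alt_spec array n hpre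
  rw [← hs] at hm' hall'
  set rA := (t.foldl (stepA n) (x, some |n - x|)).1 with hrA
  have hAval : solution array n = rA := by
    rw [hA]; simp only [List.foldl_cons, hstep0]; exact hrA.symm
  have hrAmem : rA ∈ s := by
    rw [hxt]
    rcases hm with h | h
    · simp [h]
    · simp [h]
  have hkA : ∀ y ∈ s, kLe n rA y := by
    intro y hy
    rw [hxt] at hy
    rcases List.mem_cons.mp hy with rfl | hyt
    · obtain ⟨_, hk, _⟩ := foldA_spec n t y
        (fun z hz => (List.pairwise_cons.mp hp).1 z hz) (List.pairwise_cons.mp hp).2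
      exact hk
    · exact hall y hyt
  rw [hAval]
  exact kLe_antisymm (hkA _ hm') (hall' _ hrAmem)
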